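-- pv_equiv track=rewrite | github.com/REvDl/Algorithmic_practice | leetcode/2026/easy/areSimilar.py | areSimilar_v2
-- ===== SOURCE A (Python) =====
-- from typing import List
--
-- def areSimilar_v2(mat: List[List[int]], k: int) -> bool:
-- 	rows, cols = len(mat), len(mat[0])
-- 	k %= cols
-- 	if k == 0:
-- 		return True
-- 	for i in range(rows):
-- 		for j in range(cols):
-- 			if mat[i][j] != mat[i][(j + k) % cols]:
-- 				return False
-- 	return True
-- ===== SOURCE B (Python) =====
-- from typing import List
--
-- def areSimilar_v2(mat: List[List[int]], k: int) -> bool: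
-- 	cols = len(mat[0])
-- 	k %= cols
-- 	# g = gcd(k, cols); gcd(0, cols) == cols makes the k == 0 case come out True
-- 	g = cols
-- 	while k:
-- 		g, k = k, g % k
-- 	# a row equals its cyclic shift by k iff it is periodic with period gcd(k, cols)
-- 	return all(row[j] == row[j % g] for row in mat for j in range(cols))
-- ===== Notes on version B (the rewrite author's own statement) =====
-- stated objective: alternative
-- what changed: Replaces the rotation comparison mat[i][j] == mat[i][(j+k)%cols] (with a special-cased early True for k%cols==0) by a number-theoretic reformulation: a row equals its cyclic shift by k iff it is periodic with period g = gcd(k%cols, cols), so B computes g by Euclid's algorithm and checks row[j] == row[j%g], with no special case for k==0.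
-- outside the precondition, e.g. on areSimilar_v2([[1], [1, 1, 1], []], 0): A returns True, B raises IndexError; on areSimilar_v2([[0, 1, 1], [1]], 1): A returns False, B returns False
import Mathlib
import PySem

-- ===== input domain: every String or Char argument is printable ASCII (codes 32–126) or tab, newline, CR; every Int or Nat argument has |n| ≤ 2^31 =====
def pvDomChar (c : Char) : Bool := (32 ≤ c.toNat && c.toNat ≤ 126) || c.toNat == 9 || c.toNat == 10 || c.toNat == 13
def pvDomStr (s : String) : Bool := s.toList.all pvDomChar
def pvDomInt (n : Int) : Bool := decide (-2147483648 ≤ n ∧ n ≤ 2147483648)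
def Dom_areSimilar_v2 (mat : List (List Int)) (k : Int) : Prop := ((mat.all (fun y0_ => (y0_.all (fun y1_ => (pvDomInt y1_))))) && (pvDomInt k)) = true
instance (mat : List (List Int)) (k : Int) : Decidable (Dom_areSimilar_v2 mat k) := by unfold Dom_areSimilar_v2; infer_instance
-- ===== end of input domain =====

-- B checks row periodicity with period gcd(k % cols, cols) instead of comparing each row
-- with its cyclic shift by k (alternative, same cost); equivalence is about return values
-- on genuine matrices (see Pre_).

-- ===== PORT A =====
def areSimilar_v2 (mat : List (List Int)) (k : Int) : Bool :=
  -- rows, cols = len(mat), len(mat[0]); Pre_ excludes mat = [] where mat[0] raises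
  let rows : Int := (mat.length : Int)
  let cols : Int := ((mat.headD []).length : Int)
  -- k %= cols; Pre_ excludes cols = 0 (ZeroDivisionError)
  let k' : Int := PySem.Int.mod k cols
  if k' == 0 then true
  else
    -- nested for-loops with early 'return False' = all/all over the ranges
    (PySem.List.pyRange 0 rows 1).all (fun i =>
      (PySem.List.pyRange 0 cols 1).all (fun j =>
        let row := PySem.List.pyGetD mat i []          -- mat[i], in range under Pre_
        PySem.List.pyGetD row j 0 ==                   -- mat[i][j], in range under Pre_
          PySem.List.pyGetD row (PySem.Int.mod (j + k') cols) 0))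

-- ===== PORT B =====
-- the hand-written Euclid loop 'while k: g, k = k, g % k' starting from g = cols
def gcdLoop (g k : Nat) : Nat :=
  if h : k = 0 then g else gcdLoop k (g % k)
termination_by k
decreasing_by exact Nat.mod_lt _ (Nat.pos_of_ne_zero h)

def areSimilar_v2_alt (mat : List (List Int)) (k : Int) : Bool :=
  let cols : Int := ((mat.headD []).length : Int)      -- mat[0]; Pre_ excludes mat = []
  let k' : Int := PySem.Int.mod k cols                 -- Pre_ excludes cols = 0
  let g : Int := (gcdLoop cols.toNat k'.toNat : Int)
  -- all(row[j] == row[j % g] for row in mat for j in range(cols))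
  mat.all (fun row =>
    (PySem.List.pyRange 0 cols 1).all (fun j =>
      PySem.List.pyGetD row j 0 ==
        PySem.List.pyGetD row (PySem.Int.mod j g) 0))

-- ===== PRECONDITION & SPEC =====
-- Pre_ restricts to genuine matrices (nonempty, positive width cols = len(mat[0]), every row
-- at least cols wide): outside it Python A raises (mat == [], cols == 0, or an IndexError on a
-- too-short row) or, on some ragged inputs, still returns an early False that is an accident of
-- its traversal order before the IndexError would be reached.
def Pre_areSimilar_v2 (mat : List (List Int)) (k : Int) : Prop :=
  mat ≠ [] ∧ 0 < (mat.headD []).length ∧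
    ∀ row ∈ mat, (mat.headD []).length ≤ row.length
instance (mat : List (List Int)) (k : Int) : Decidable (Pre_areSimilar_v2 mat k) := by
  unfold Pre_areSimilar_v2; infer_instance

def pvWitness_areSimilar_v2 : List (List Int) × Int := ([[1, 2, 1, 2], [3, 4, 3, 4]], 2)

def Spec_areSimilar_v2 (mat : List (List Int)) (k : Int) (out : Bool) : Prop := out = areSimilar_v2_alt mat k
instance (mat : List (List Int)) (k : Int) (out : Bool) : Decidable (Spec_areSimilar_v2 mat k out) := by unfold Spec_areSimilar_v2; infer_instance

-- ===== CLAIM (what is proved, stated in full; the proofs are below) =====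
def Claim_equal_areSimilar_v2 : Prop := ∀ (mat : List (List Int)) (k : Int), Dom_areSimilar_v2 mat k → Pre_areSimilar_v2 mat k → Spec_areSimilar_v2 mat k (areSimilar_v2 mat k)

-- ===== LEMMAS AND PROOFS =====

lemma gcdLoop_eq (k g : Nat) : gcdLoop g k = Nat.gcd k g := by
  induction k using Nat.strong_induction_on generalizing g with
  | _ k ih =>
    unfold gcdLoop
    split
    · subst ‹k = 0›; simp
    · rename_i h
      rw [ih (g % k) (Nat.mod_lt _ (Nat.pos_of_ne_zero h)) k]
      exact (Nat.gcd_rec k g).symm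

-- Nat-level forms of the two row checks
def rotChk (c κ : Nat) (row : List Int) : Bool :=
  (List.range c).all (fun j => row.getD j 0 == row.getD ((j + κ) % c) 0)
def perChk (c g : Nat) (row : List Int) : Bool :=
  (List.range c).all (fun j => row.getD j 0 == row.getD (j % g) 0)

lemma all_range_getD {α : Type} (l : List α) (d : α) (F : α → Bool) :
    (List.range l.length).all (fun i => F (l.getD i d)) = l.all F := by
  induction l with
  | nil => simp
  | cons x xs ih =>
    simp only [List.length_cons, List.range_succ_eq_map, List.all_cons, List.all_map,
      Function.comp_def, List.getD_cons_zero, List.getD_cons_succ, ih]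

lemma all_congr_of_mem {α : Type} (l : List α) (f g : α → Bool)
    (h : ∀ x ∈ l, f x = g x) : l.all f = l.all g := by
  induction l with
  | nil => rfl
  | cons x xs ih =>
    simp only [List.all_cons, h x (by simp), ih (fun y hy => h y (by simp [hy]))]

-- core number theory: a function on range c is invariant under the cyclic shift by κ
-- iff it is periodic with period gcd κ c
lemma rot_iff_period (f : Nat → Int) (c κ : Nat) (hc : 0 < c) :
    (∀ j < c, f j = f ((j + κ) % c)) ↔ (∀ j < c, f j = f (j % Nat.gcd κ c)) := by
  set g := Nat.gcd κ c with hg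
  have hgc : g ∣ c := Nat.gcd_dvd_right κ c
  have hgκ : g ∣ κ := Nat.gcd_dvd_left κ c
  have hgpos : 0 < g := Nat.gcd_pos_of_pos_right κ hc
  constructor
  · intro h
    -- invariance under t shifts
    have aux : ∀ t : Nat, ∀ j < c, f j = f ((j + t * κ) % c) := by
      intro t
      induction t with
      | zero => intro j hj; simp [Nat.mod_eq_of_lt hj]
      | succ t ih =>
        intro j hj
        have h1 := ih j hj
        have h2 := h ((j + t * κ) % c) (Nat.mod_lt _ hc)
        rw [Nat.mod_add_mod] at h2
        rw [h1, h2]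
        congr 2
        ring
    -- indices congruent mod g get equal values (Bezout)
    have reach : ∀ a b : Nat, a < c → b < c → a % g = b % g → f a = f b := by
      intro a b ha hb hab
      set d := (b + c - a) % c with hd
      have hdlt : d < c := Nat.mod_lt _ hc
      have hba : (g : Int) ∣ (b : Int) - (a : Int) := (Nat.modEq_iff_dvd (n := g)).1 hab
      have hgd : g ∣ d := by
        rw [hd, Nat.dvd_mod_iff hgc]
        have h2 : (g : Int) ∣ ((b + c - a : Nat) : Int) := by
          have he : ((b + c - a : Nat) : Int) = ((b : Int) - a) + c := by omega
          rw [he]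
          exact dvd_add hba (Int.natCast_dvd_natCast.2 hgc)
        exact_mod_cast h2
      obtain ⟨m, hm⟩ := hgd
      have bez := Nat.gcd_eq_gcd_ab κ c
      set x := Nat.gcdA κ c with hx
      set y := Nat.gcdB κ c with hy
      have hgZ : (g : Int) = (κ : Int) * x + (c : Int) * y := by rw [hg]; exact bez
      have hcpos : (0 : Int) < (c : Int) := by exact_mod_cast hc
      set T : Int := (x * m) % c with hT
      have hT0 : 0 ≤ T := Int.emod_nonneg _ (by omega)
      set t : Nat := T.toNat with ht
      have htT : (t : Int) = T := Int.toNat_of_nonneg hT0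
      have hdZ : (d : Int) = (g : Int) * m := by exact_mod_cast hm
      have hdvd : (c : Int) ∣ (d : Int) - (t : Int) * (κ : Int) := by
        have e1 : (x * m : Int) - T = c * ((x * m) / c) := by
          have := Int.ediv_add_emod (x * m) c
          rw [hT]; linarith
        have e2 : (d : Int) - (x * m) * κ = (c : Int) * (y * m) := by
          rw [hdZ, hgZ]; ring
        have e3 : (d : Int) - (t : Int) * κ
            = ((d : Int) - (x * m) * κ) + ((x * m : Int) - T) * κ := by
          rw [htT]; ring
        rw [e3, e2, e1]
        exact dvd_add ⟨y * m, rfl⟩ ⟨(x * m) / c * κ, by ring⟩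
      have hmodeq : t * κ ≡ d [MOD c] := (Nat.modEq_iff_dvd).2 (by push_cast; exact hdvd)
      have step2 : (a + t * κ) % c = b := by
        have e3 : (a + t * κ) % c = (a + d) % c := Nat.ModEq.add_left a hmodeq
        have h5 : a + d ≡ a + (b + c - a) [MOD c] :=
          Nat.ModEq.add_left a (by rw [hd]; exact Nat.mod_modEq _ _)
        calc (a + t * κ) % c = (a + d) % c := e3
          _ = (a + (b + c - a)) % c := h5
          _ = (b + c) % c := by rw [show a + (b + c - a) = b + c by omega]
          _ = b := by rw [Nat.add_mod_right, Nat.mod_eq_of_lt hb]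
      rw [aux t a ha, step2]
    intro j hj
    exact reach j (j % g) hj (lt_of_lt_of_le (Nat.mod_lt _ hgpos) (Nat.le_of_dvd hc hgc))
      (Nat.mod_mod_of_dvd j dvd_rfl).symm
  · intro h j hj
    have h1 := h j hj
    have h2 := h ((j + κ) % c) (Nat.mod_lt _ hc)
    have e : (j + κ) % c % g = j % g := by
      rw [Nat.mod_mod_of_dvd _ hgc]
      obtain ⟨m, hm⟩ := hgκ
      rw [hm, Nat.add_mul_mod_self_left]
    rw [h1, h2, e]

lemma rotChk_eq_perChk (c κ : Nat) (hc : 0 < c) (row : List Int) :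
    rotChk c κ row = perChk c (Nat.gcd κ c) row := by
  have key := rot_iff_period (fun n => row.getD n 0) c κ hc
  have : (rotChk c κ row = true) ↔ (perChk c (Nat.gcd κ c) row = true) := by
    unfold rotChk perChk
    simp only [List.all_eq_true, List.mem_range, beq_iff_eq]
    exact key
  exact Bool.coe_iff_coe.1 this

lemma rotChk_zero (c : Nat) (row : List Int) : rotChk c 0 row = true := by
  unfold rotChk
  simp only [List.all_eq_true, List.mem_range, beq_iff_eq]
  intro j hj
  rw [Nat.add_zero, Nat.mod_eq_of_lt hj]

-- reduce port A to its Nat form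
lemma portA_eq (mat : List (List Int)) (k : Int) (hc : 0 < (mat.headD []).length) :
    areSimilar_v2 mat k =
      if (PySem.Int.mod k ((mat.headD []).length : Int)).toNat = 0 then true
      else mat.all (rotChk (mat.headD []).length (PySem.Int.mod k ((mat.headD []).length : Int)).toNat) := by
  simp only [areSimilar_v2]
  set c := (mat.headD []).length with hcdef
  have hcpos : (0 : Int) < (c : Int) := by exact_mod_cast hc
  have h0 : 0 ≤ PySem.Int.mod k (c : Int) := PySem.Int.mod_nonneg k hcpos
  set κ := (PySem.Int.mod k (c : Int)).toNat with hκ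
  have hk' : PySem.Int.mod k (c : Int) = (κ : Int) := (Int.toNat_of_nonneg h0).symm
  rw [hk']
  by_cases hz : κ = 0
  · simp [hz]
  · have hbeq : ((κ : Int) == 0) = false := by
      simp only [beq_eq_false_iff_ne, ne_eq]
      exact_mod_cast hz
    rw [hbeq, if_neg hz]
    simp only [Bool.false_eq_true, if_false]
    simp only [PySem.List.pyRange_one, Int.sub_zero, Int.toNat_natCast, List.all_map,
      Function.comp_def, Int.zero_add]
    rw [← all_range_getD mat [] (rotChk c κ)]
    apply all_congr_of_mem
    intro i _
    simp only [PySem.List.pyGetD_natCast]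
    unfold rotChk
    apply all_congr_of_mem
    intro j _
    have hcast : (j : Int) + (κ : Int) = ((j + κ : Nat) : Int) := by push_cast; ring
    rw [hcast, PySem.Int.mod_natCast]
    simp only [PySem.List.pyGetD_natCast]

-- reduce port B to its Nat form
lemma portB_eq (mat : List (List Int)) (k : Int) (hc : 0 < (mat.headD []).length) :
    areSimilar_v2_alt mat k =
      mat.all (perChk (mat.headD []).length
        (Nat.gcd (PySem.Int.mod k ((mat.headD []).length : Int)).toNat (mat.headD []).length)) := by
  simp only [areSimilar_v2_alt]
  set c := (mat.headD []).length with hcdef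
  have hcpos : (0 : Int) < (c : Int) := by exact_mod_cast hc
  set κ := (PySem.Int.mod k (c : Int)).toNat with hκ
  rw [show ((c : Int)).toNat = c from Int.toNat_natCast c, gcdLoop_eq]
  apply all_congr_of_mem
  intro row _
  simp only [PySem.List.pyRange_one, Int.sub_zero, Int.toNat_natCast, List.all_map,
    Function.comp_def, Int.zero_add]
  unfold perChk
  apply all_congr_of_mem
  intro j _
  rw [PySem.Int.mod_natCast]
  simp only [PySem.List.pyGetD_natCast]

-- ===== VERDICT (by name: the statement is the Claim_ definition above) =====
theorem areSimilar_v2_spec : Claim_equal_areSimilar_v2 := by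
  intro mat k _ hpre
  obtain ⟨hne, hc, _⟩ := hpre
  unfold Spec_areSimilar_v2
  rw [portA_eq mat k hc, portB_eq mat k hc]
  set c := (mat.headD []).length
  set κ := (PySem.Int.mod k (c : Int)).toNat
  by_cases hz : κ = 0
  · rw [if_pos hz, hz]
    symm
    rw [List.all_eq_true]
    intro row hrow
    rw [← rotChk_eq_perChk c 0 hc row]
    exact rotChk_zero c row
  · rw [if_neg hz]
    exact all_congr_of_mem _ _ _ (fun row _ => rotChk_eq_perChk c κ hc row)
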